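-- pv_equiv track=rewrite | github.com/Jerempire/gym-anything | benchmarks/cua_world/environments/juris_m_env/tasks/law_review_publication_prep/verifier.py | _count_no_abstract_now_filled
-- ===== SOURCE A (Python) =====
-- from typing import Any, Dict, List
--
-- NO_ABSTRACT_SLUGS = [
--     "taxonomy",
--     "lex informatica",
--     "broken promises",
--     "big data ethics",
-- ]
--
-- def _fuzzy_match(target_slug: str, candidate: str) -> bool:
--     """Return True if target_slug appears as a substring of candidate (case-insensitive)."""
--     return target_slug.lower() in candidate.lower()
--
-- def _count_no_abstract_now_filled(items_with_abstract: List[str]) -> int: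
--     """
--     Count how many of the 4 originally-no-abstract articles now have an abstract.
--     Uses fuzzy slug matching against each item's display name.
--     """
--     filled = 0
--     for slug in NO_ABSTRACT_SLUGS:
--         for name in items_with_abstract:
--             if _fuzzy_match(slug, name):
--                 filled += 1
--                 break
--     return filled
-- ===== SOURCE B (Python) =====
-- from typing import Any, Dict, List
--
-- NO_ABSTRACT_SLUGS = [
--     "taxonomy",
--     "lex informatica",
--     "broken promises",
--     "big data ethics",
-- ]
--
-- def _count_no_abstract_now_filled(items_with_abstract: List[str]) -> int:
--     # Inverted loop order: scan each name once, collect which slugs it covers;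
--     # the slugs are distinct, so the number of distinct matched slugs is the count.
--     matched = set()
--     for name in items_with_abstract:
--         low = name.lower()
--         for slug in NO_ABSTRACT_SLUGS:
--             if slug.lower() in low:
--                 matched.add(slug)
--     return len(matched)
-- ===== Notes on version B (the rewrite author's own statement) =====
-- stated objective: alternative
-- what changed: Loop nesting is inverted: B scans each name once (lowercasing it a single time) and accumulates the set of slugs it covers, returning the set's size, instead of A's per-slug scan over all names with a break.
import Mathlib
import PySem

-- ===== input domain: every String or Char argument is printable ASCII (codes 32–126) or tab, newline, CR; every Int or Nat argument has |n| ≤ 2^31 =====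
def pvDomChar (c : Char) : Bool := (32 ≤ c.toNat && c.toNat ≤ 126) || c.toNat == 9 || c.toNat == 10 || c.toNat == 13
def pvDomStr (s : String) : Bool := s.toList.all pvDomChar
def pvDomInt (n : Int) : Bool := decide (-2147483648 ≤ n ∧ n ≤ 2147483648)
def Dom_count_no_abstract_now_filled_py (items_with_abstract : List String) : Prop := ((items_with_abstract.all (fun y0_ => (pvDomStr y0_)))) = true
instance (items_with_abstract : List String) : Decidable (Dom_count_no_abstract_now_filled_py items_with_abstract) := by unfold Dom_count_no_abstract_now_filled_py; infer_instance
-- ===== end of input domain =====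

-- ===== PORT A =====
-- B inverts A's loop nesting (one pass over the names, accumulating matched slugs as a set); alternative decomposition, same cost.
def NO_ABSTRACT_SLUGS : List String :=
  ["taxonomy", "lex informatica", "broken promises", "big data ethics"]

def fuzzy_match_py (target_slug : String) (candidate : String) : Bool :=
  PySem.Str.isIn (PySem.Str.lower target_slug) (PySem.Str.lower candidate)

-- A's inner `for name … : if match: filled += 1; break` loop, as a scan returning whether a break occurred
def pvScanNames (slug : String) : List String → Bool
  | [] => false
  | n :: rest => if fuzzy_match_py slug n then true else pvScanNames slug rest

def count_no_abstract_now_filled_py (items_with_abstract : List String) : Int :=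
  NO_ABSTRACT_SLUGS.foldl
    (fun filled slug => if pvScanNames slug items_with_abstract then filled + 1 else filled) 0

-- ===== PORT B =====
-- B's inner loop: add to `matched` every slug whose lowercase form occurs in the (pre-lowered) name
def pvAddMatches (acc : PySem.Set String) (name : String) : PySem.Set String :=
  let low := PySem.Str.lower name
  NO_ABSTRACT_SLUGS.foldl
    (fun a slug => if PySem.Str.isIn (PySem.Str.lower slug) low then PySem.Set.add a slug else a) acc

def count_no_abstract_now_filled_py_alt (items_with_abstract : List String) : Int :=
  ((items_with_abstract.foldl pvAddMatches PySem.Set.empty).length : Int)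

-- ===== PRECONDITION & SPEC =====
def Spec_count_no_abstract_now_filled_py (items_with_abstract : List String) (out : Int) : Prop := out = count_no_abstract_now_filled_py_alt items_with_abstract
instance (items_with_abstract : List String) (out : Int) : Decidable (Spec_count_no_abstract_now_filled_py items_with_abstract out) := by unfold Spec_count_no_abstract_now_filled_py; infer_instance

-- ===== CLAIM =====
def Claim_equal_count_no_abstract_now_filled_py : Prop := ∀ (items_with_abstract : List String), Dom_count_no_abstract_now_filled_py items_with_abstract → Spec_count_no_abstract_now_filled_py items_with_abstract (count_no_abstract_now_filled_py items_with_abstract)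

-- ===== LEMMAS AND PROOFS =====

-- proof-only abbreviation: does any name fuzzy-match this slug?
def pvP (items : List String) (slug : String) : Bool :=
  items.any (fun n => fuzzy_match_py slug n)

theorem pvScanNames_eq_any (slug : String) (items : List String) :
    pvScanNames slug items = pvP items slug := by
  unfold pvP
  induction items with
  | nil => rfl
  | cons n rest ih =>
    simp only [pvScanNames, List.any_cons]
    by_cases h : fuzzy_match_py slug n = true <;> simp [h, ih]

theorem pvAddMatches_mem (acc : PySem.Set String) (name : String) (x : String) :
    x ∈ pvAddMatches acc name ↔
      x ∈ acc ∨ (x ∈ NO_ABSTRACT_SLUGS ∧ fuzzy_match_py x name = true) := by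
  have gen : ∀ (slugs : List String) (a : PySem.Set String),
      x ∈ slugs.foldl (fun a slug =>
          if PySem.Str.isIn (PySem.Str.lower slug) (PySem.Str.lower name) then PySem.Set.add a slug else a) a ↔
        x ∈ a ∨ (x ∈ slugs ∧ fuzzy_match_py x name = true) := by
    intro slugs
    induction slugs with
    | nil => intro a; simp
    | cons s rest ih =>
      intro a
      simp only [List.foldl_cons, ih, List.mem_cons]
      by_cases h : PySem.Str.isIn (PySem.Str.lower s) (PySem.Str.lower name) = true
      · simp only [h, if_pos, PySem.Set.mem_add]
        constructor
        · rintro (( ha | rfl) | ⟨hm, hf⟩)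
          · exact Or.inl ha
          · exact Or.inr ⟨Or.inl rfl, h⟩
          · exact Or.inr ⟨Or.inr hm, hf⟩
        · rintro (ha | ⟨(rfl | hm), hf⟩)
          · exact Or.inl (Or.inl ha)
          · exact Or.inl (Or.inr rfl)
          · exact Or.inr ⟨hm, hf⟩
      · simp only [if_neg h]
        constructor
        · rintro (ha | ⟨hm, hf⟩)
          · exact Or.inl ha
          · exact Or.inr ⟨Or.inr hm, hf⟩
        · rintro (ha | ⟨(rfl | hm), hf⟩)
          · exact Or.inl ha
          · exact absurd hf h
          · exact Or.inr ⟨hm, hf⟩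
  exact gen NO_ABSTRACT_SLUGS acc

theorem pvAddMatches_nodup (acc : PySem.Set String) (name : String) (h : acc.Nodup) :
    (pvAddMatches acc name).Nodup := by
  have gen : ∀ (slugs : List String) (a : PySem.Set String), a.Nodup →
      (slugs.foldl (fun a slug =>
          if PySem.Str.isIn (PySem.Str.lower slug) (PySem.Str.lower name) then PySem.Set.add a slug else a) a).Nodup := by
    intro slugs
    induction slugs with
    | nil => intro a ha; exact ha
    | cons s rest ih =>
      intro a ha
      simp only [List.foldl_cons]
      apply ih
      split
      · exact PySem.Set.nodup_add _ _ ha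
      · exact ha
  exact gen NO_ABSTRACT_SLUGS acc h

theorem foldl_pvAddMatches_mem (items : List String) (acc : PySem.Set String) (x : String) :
    x ∈ items.foldl pvAddMatches acc ↔
      x ∈ acc ∨ (x ∈ NO_ABSTRACT_SLUGS ∧ items.any (fun n => fuzzy_match_py x n) = true) := by
  induction items generalizing acc with
  | nil => simp
  | cons n rest ih =>
    simp only [List.foldl_cons, ih, pvAddMatches_mem, List.any_cons]
    constructor
    · rintro ((ha | ⟨hm, hf⟩) | ⟨hm, hr⟩)
      · exact Or.inl ha
      · exact Or.inr ⟨hm, by simp [hf]⟩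
      · exact Or.inr ⟨hm, by simp [hr]⟩
    · rintro (ha | ⟨hm, hor⟩)
      · exact Or.inl (Or.inl ha)
      · rcases Bool.or_eq_true_iff.mp hor with hf | hr
        · exact Or.inl (Or.inr ⟨hm, hf⟩)
        · exact Or.inr ⟨hm, hr⟩

theorem foldl_pvAddMatches_nodup (items : List String) (acc : PySem.Set String) (h : acc.Nodup) :
    (items.foldl pvAddMatches acc).Nodup := by
  induction items generalizing acc with
  | nil => exact h
  | cons n rest ih => exact ih _ (pvAddMatches_nodup _ _ h)

-- ===== VERDICT =====
theorem count_no_abstract_now_filled_py_spec : Claim_equal_count_no_abstract_now_filled_py := by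
  intro items _
  unfold Spec_count_no_abstract_now_filled_py
  unfold count_no_abstract_now_filled_py count_no_abstract_now_filled_py_alt
  -- B's final set has the same members as the nodup list NO_ABSTRACT_SLUGS.filter (pvP items), hence the same length
  have hmem : ∀ x, x ∈ items.foldl pvAddMatches PySem.Set.empty ↔ x ∈ NO_ABSTRACT_SLUGS.filter (pvP items) := by
    intro x
    rw [foldl_pvAddMatches_mem, List.mem_filter]
    simp [PySem.Set.empty, pvP]
  have hnd : (items.foldl pvAddMatches PySem.Set.empty).Nodup :=
    foldl_pvAddMatches_nodup _ _ (by simp [PySem.Set.empty])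
  have hndf : (NO_ABSTRACT_SLUGS.filter (pvP items)).Nodup := by
    apply List.Nodup.filter
    decide
  have hperm : List.Perm (items.foldl pvAddMatches PySem.Set.empty) (NO_ABSTRACT_SLUGS.filter (pvP items)) :=
    (List.perm_ext_iff_of_nodup hnd hndf).mpr hmem
  rw [hperm.length_eq]
  -- both sides are now determined by the four Booleans pvP items slugᵢ
  simp only [pvScanNames_eq_any, NO_ABSTRACT_SLUGS]
  cases h1 : pvP items "taxonomy" <;> cases h2 : pvP items "lex informatica" <;>
    cases h3 : pvP items "broken promises" <;> cases h4 : pvP items "big data ethics" <;>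
    simp [List.foldl, List.filter, h1, h2, h3, h4]
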